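-- pv_equiv track=rewrite | github.com/101Jay/algorithm-source | Programmers/Implement/110.py | solution
-- ===== SOURCE A (Python) =====
-- from collections import deque
--
-- def solution(s):
--     answer = []
--
--     for target in s:
--         if len(target) <= 3:
--             # 행동을 할 수 없음으로 그대로 담기
--             answer.append(target)
--             continue
--
--         cnt = 0
--         # 110을 몇 번 뺄 수 있는지 구하기
--         temp_target = deque(list(target))
--
--         rest = []
--         comp_lst = deque([])
--         comp_lst.append(temp_target.popleft())
--         comp_lst.append(temp_target.popleft())
--
--         correct_queue = deque(['1', '1', '0'])
--
--         while temp_target: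
--             if len(comp_lst) == 3:
--                 rest.append(comp_lst.popleft())
--             comp_lst.append(temp_target.popleft())
--
--             if comp_lst == correct_queue:
--                 cnt += 1
--
--                 # 남은 문자열로 다시 비교하기 위해 세팅
--                 comp_lst = deque([])
--                 for _ in range(2):
--                     if rest:
--                         comp_lst.appendleft(rest.pop())  # rest에서 가져온 건 앞으로 추가
--
--                 # comp_lst가 얼마나 차있는지에 따라서 처리
--                 if len(comp_lst) == 0:
--                     for _ in range(2):
--                         if temp_target:  # temp_target에거 가져온 건 뒤로 추가
--                             comp_lst.append(temp_target.popleft())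
--                 elif len(comp_lst) == 1:
--                     if temp_target:
--                         comp_lst.append(temp_target.popleft())
--
--                 # 그런데도 comp_lst가 2가되지 않았다면 더이상 비교 불가
--                 if len(comp_lst) != 2:
--                     break
--
--         # 110이 없는 문자열이라면 해당 내역을 저장하고 탈출
--         if cnt == 0:
--             answer.append(target)
--             continue
--
--         # 110을 모두 제거한 문자열에서 가장 마지막 0 뒤에 넣어주는 방식
--         tg = rest + list(comp_lst) + list(temp_target)
--
--         if tg:
--             is_append = False
--             for i in range(len(tg) - 1, -1, -1):
--                 if tg[i] == '0':
--                     ans = "".join(tg[:i + 1]) + ('110' * cnt) + "".join(tg[i + 1:])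
--                     is_append = True
--                     break
--
--             if not is_append:
--                 # 0이 없는 경우 -> 맨 앞에 넣어줌
--                 ans = '110' * cnt + "".join(tg)
--         else:
--             # 만약 tg가 비어있다면
--             ans = '110' * cnt
--
--         answer.append(ans)
--
--     return answer
-- ===== SOURCE B (Python) =====
-- def solution(s):
--     answer = []
--     for t in s:
--         if len(t) <= 3:
--             answer.append(t)
--             continue
--         st = []
--         cnt = 0
--         for ch in t:
--             st.append(ch)
--             if st[-3:] == ['1', '1', '0']:
--                 del st[-3:]
--                 cnt += 1
--         if cnt == 0:
--             answer.append(t)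
--             continue
--         j = len(st)
--         while j > 0 and st[j - 1] != '0':
--             j -= 1
--         answer.append(''.join(st[:j]) + '110' * cnt + ''.join(st[j:]))
--     return answer
-- ===== Notes on version B (the rewrite author's own statement) =====
-- stated objective: simpler
-- what changed: Replaces A's deque-based 3-char sliding window with manual refill/backtrack bookkeeping by a plain stack pass (push each char, pop when the top three are '110'), and replaces A's three-branch reinsertion (empty / no zero / last zero) by one backward while-loop computing a single splice point.
import Mathlib
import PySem

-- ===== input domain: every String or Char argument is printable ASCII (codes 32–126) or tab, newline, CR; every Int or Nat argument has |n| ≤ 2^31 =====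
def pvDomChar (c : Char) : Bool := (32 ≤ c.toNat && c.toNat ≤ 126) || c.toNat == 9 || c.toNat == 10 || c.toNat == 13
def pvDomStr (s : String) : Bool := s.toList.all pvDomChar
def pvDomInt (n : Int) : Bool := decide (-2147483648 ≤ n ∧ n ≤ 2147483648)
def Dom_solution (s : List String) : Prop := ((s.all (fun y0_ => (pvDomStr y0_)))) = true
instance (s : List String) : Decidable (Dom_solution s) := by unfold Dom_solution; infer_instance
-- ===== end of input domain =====

-- B replaces A's deque sliding-window machinery by a plain stack pass and A's three reinsertion
-- branches by a single splice point (objective: simpler); same return values everywhere.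

-- ===== PORT A =====
-- if len(comp_lst) == 3: rest.append(comp_lst.popleft())
def normA (rest comp : List Char) : List Char × List Char :=
  if comp.length = 3 then (rest ++ [comp.headI], comp.tail) else (rest, comp)

-- comp_lst = deque([]); twice: if rest: comp_lst.appendleft(rest.pop())
-- (two pops appended-left restore original order: the last min 2 |rest| elements)
def popBack2 (r : List Char) : List Char × List Char :=
  (r.take (r.length - min 2 r.length), r.drop (r.length - min 2 r.length))

-- how many chars the refill takes from temp_target ('if temp_target: comp_lst.append(...)')
def refillCount (comp3 temp1 : List Char) : Nat :=
  if comp3.length = 0 then min 2 temp1.length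
  else if comp3.length = 1 then min 1 temp1.length else 0

-- A's while-loop over temp_target: state (rest, comp_lst, temp_target, cnt);
-- each iteration consumes at least the popped head of temp, so temp.length decreases
def loopA (rest comp temp : List Char) (cnt : Nat) :
    List Char × List Char × List Char × Nat :=
  match temp with
  | [] => (rest, comp, [], cnt)
  | c :: temp1 =>
    if (normA rest comp).2 ++ [c] = ['1', '1', '0'] then
      if ((popBack2 (normA rest comp).1).2 ++
          temp1.take (refillCount (popBack2 (normA rest comp).1).2 temp1)).length = 2 then
        loopA (popBack2 (normA rest comp).1).1
          ((popBack2 (normA rest comp).1).2 ++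
            temp1.take (refillCount (popBack2 (normA rest comp).1).2 temp1))
          (temp1.drop (refillCount (popBack2 (normA rest comp).1).2 temp1)) (cnt + 1)
      else  -- break
        ((popBack2 (normA rest comp).1).1,
         (popBack2 (normA rest comp).1).2 ++
           temp1.take (refillCount (popBack2 (normA rest comp).1).2 temp1),
         temp1.drop (refillCount (popBack2 (normA rest comp).1).2 temp1), cnt + 1)
    else
      loopA (normA rest comp).1 ((normA rest comp).2 ++ [c]) temp1 cnt
termination_by temp.length
decreasing_by
  · simp only [List.length_drop, List.length_cons]; omega
  · simp only [List.length_cons]; omega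

-- for i in range(len(tg)-1, -1, -1): if tg[i] == '0': break — the found index
def scanA (tg : List Char) : Nat → Option Nat
  | 0 => none
  | i + 1 => if tg[i]? = some '0' then some i else scanA tg i

-- A's reinsertion of '110'*cnt after the last '0' (tg[:i+1] / tg[i+1:] are .take/.drop: i+1 ≥ 0)
def insertA (tg : List Char) (cnt : Nat) : String :=
  if tg ≠ [] then
    match scanA tg tg.length with
    | some i => String.ofList (tg.take (i + 1) ++
        (List.replicate cnt ['1', '1', '0']).flatten ++ tg.drop (i + 1))
    | none => String.ofList ((List.replicate cnt ['1', '1', '0']).flatten ++ tg)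
  else String.ofList (List.replicate cnt ['1', '1', '0']).flatten

def solveA (target : String) : String :=
  if target.toList.length ≤ 3 then target
  else
    match target.toList with
    | a :: b :: rest0 =>
      if (loopA [] [a, b] rest0 0).2.2.2 = 0 then target
      else insertA ((loopA [] [a, b] rest0 0).1 ++ (loopA [] [a, b] rest0 0).2.1 ++
             (loopA [] [a, b] rest0 0).2.2.1) (loopA [] [a, b] rest0 0).2.2.2
    | _ => target  -- unreachable guard: here target.toList.length > 3

def solution (s : List String) : List String :=
  s.foldl (fun answer target => answer ++ [solveA target]) []

-- ===== PORT B =====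
-- one stack step: push ch; if the top three are '1','1','0' pop them and count
-- (st[-3:] is exactly st.drop (st.length - 3); del st[-3:] is st.take (st.length - 3))
def stepB (p : List Char × Nat) (ch : Char) : List Char × Nat :=
  if (p.1 ++ [ch]).drop ((p.1 ++ [ch]).length - 3) = ['1', '1', '0'] then
    ((p.1 ++ [ch]).take ((p.1 ++ [ch]).length - 3), p.2 + 1)
  else (p.1 ++ [ch], p.2)

-- j = len(st); while j > 0 and st[j-1] != '0': j -= 1
def findJ (st : List Char) : Nat → Nat
  | 0 => 0
  | j + 1 => if st[j]? = some '0' then j + 1 else findJ st j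

-- ''.join(st[:j]) + '110'*cnt + ''.join(st[j:])
def insertB (st : List Char) (cnt : Nat) : String :=
  String.ofList (st.take (findJ st st.length) ++
    (List.replicate cnt ['1', '1', '0']).flatten ++ st.drop (findJ st st.length))

def solveB (t : String) : String :=
  if t.toList.length ≤ 3 then t
  else if (t.toList.foldl stepB ([], 0)).2 = 0 then t
  else insertB (t.toList.foldl stepB ([], 0)).1 (t.toList.foldl stepB ([], 0)).2

def solution_alt (s : List String) : List String :=
  s.foldl (fun answer t => answer ++ [solveB t]) []

-- ===== PRECONDITION & SPEC =====
def Spec_solution (s : List String) (out : List String) : Prop := out = solution_alt s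
instance (s : List String) (out : List String) : Decidable (Spec_solution s out) := by unfold Spec_solution; infer_instance

-- ===== CLAIM (what is proved, stated in full; the proofs are below) =====
def Claim_equal_solution : Prop := ∀ (s : List String), Dom_solution s → Spec_solution s (solution s)

-- ===== LEMMAS AND PROOFS =====

-- pushing onto a stack of length < 2 never pops
lemma stepB_short (p : List Char × Nat) (c : Char) (h : p.1.length < 2) :
    stepB p c = (p.1 ++ [c], p.2) := by
  unfold stepB
  have hlen : (p.1 ++ [c]).length - 3 = 0 := by simp; omega
  rw [hlen, List.drop_zero]
  have hne : (p.1 ++ [c]).length ≠ 3 := by simp; omega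
  rw [if_neg (by intro he; apply hne; rw [he]; rfl)]

lemma stepB_nil (k : Nat) (x : Char) : stepB ([], k) x = ([x], k) := by
  rw [stepB_short _ _ (by simp)]; rfl

lemma stepB_one (a : Char) (k : Nat) (x : Char) : stepB ([a], k) x = ([a, x], k) := by
  rw [stepB_short _ _ (by simp)]; rfl

-- the simulation invariant: A's (rest, comp, temp, cnt) tracks B's stack fold,
-- provided comp holds the stack's last 2 or 3 characters
lemma loopA_sim (n : Nat) : ∀ (temp rest comp : List Char) (cnt : Nat),
    temp.length ≤ n → (comp.length = 2 ∨ comp.length = 3) →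
    ((loopA rest comp temp cnt).1 ++ (loopA rest comp temp cnt).2.1 ++
       (loopA rest comp temp cnt).2.2.1,
     (loopA rest comp temp cnt).2.2.2) = List.foldl stepB (rest ++ comp, cnt) temp := by
  induction n with
  | zero =>
    intro temp rest comp cnt hn _
    have : temp = [] := by cases temp <;> simp_all
    subst this; simp [loopA]
  | succ n ih =>
    intro temp rest comp cnt hn hcomp
    cases temp with
    | nil => simp [loopA]
    | cons c temp1 =>
      rw [loopA]
      set rc := normA rest comp with hrc
      have hS : rc.1 ++ rc.2 = rest ++ comp := by
        rcases hcomp with h2 | h3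
        · rw [hrc, normA, if_neg (by omega)]
        · rw [hrc, normA, if_pos h3]
          cases comp with
          | nil => simp at h3
          | cons x xs => simp
      have hc1 : rc.2.length = 2 := by
        rcases hcomp with h2 | h3
        · rw [hrc, normA, if_neg (by omega)]; exact h2
        · rw [hrc, normA, if_pos h3]
          cases comp with
          | nil => simp at h3
          | cons x xs => simpa using by simpa using h3
      have hfold : List.foldl stepB (rest ++ comp, cnt) (c :: temp1)
          = List.foldl stepB (stepB (rest ++ comp, cnt) c) temp1 := rfl
      have hassoc : rest ++ comp ++ [c] = rc.1 ++ (rc.2 ++ [c]) := by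
        rw [← hS]; simp
      have hlen : (rest ++ comp ++ [c]).length - 3 = rc.1.length := by
        rw [hassoc]; simp [hc1]
      have htop : (rest ++ comp ++ [c]).drop ((rest ++ comp ++ [c]).length - 3)
          = rc.2 ++ [c] := by rw [hlen, hassoc, List.drop_left]
      have htake : (rest ++ comp ++ [c]).take ((rest ++ comp ++ [c]).length - 3)
          = rc.1 := by rw [hlen, hassoc, List.take_left]
      by_cases h110 : rc.2 ++ [c] = ['1', '1', '0']
      · -- removal branch
        have hstep : stepB (rest ++ comp, cnt) c = (rc.1, cnt + 1) := by
          unfold stepB; simp only []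
          rw [htop, if_pos h110, htake]
        rw [if_pos h110, hfold, hstep]
        set comp3 := (popBack2 rc.1).2 with hcomp3
        set rest2 := (popBack2 rc.1).1 with hrest2
        have hjoin : rest2 ++ comp3 = rc.1 := List.take_append_drop _ _
        have hc3 : comp3.length = min 2 rc.1.length := by
          rw [hcomp3]
          show (rc.1.drop (rc.1.length - min 2 rc.1.length)).length = min 2 rc.1.length
          rw [List.length_drop]; omega
        by_cases h2 : 2 ≤ rc.1.length
        · -- stack keeps ≥ 2 chars: no refill from temp
          have hc3' : comp3.length = 2 := by omega
          have hm : refillCount comp3 temp1 = 0 := by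
            rw [refillCount, hc3']; simp
          rw [hm]
          simp only [List.take_zero, List.append_nil, List.drop_zero]
          rw [if_pos hc3']
          have := ih temp1 rest2 comp3 (cnt + 1) (by simp only [List.length_cons] at hn; omega) (Or.inl hc3')
          rw [hjoin] at this; exact this
        · have hc3'' : comp3 = rc.1 := by
            rw [hcomp3]
            show rc.1.drop (rc.1.length - min 2 rc.1.length) = rc.1
            rw [show rc.1.length - min 2 rc.1.length = 0 by omega, List.drop_zero]
          have hrest2' : rest2 = [] := by
            rw [hrest2]
            show rc.1.take (rc.1.length - min 2 rc.1.length) = []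
            rw [show rc.1.length - min 2 rc.1.length = 0 by omega, List.take_zero]
          interval_cases hL : rc.1.length
          · -- empty stack after removal: refill up to 2 from temp1
            have hnil : rc.1 = [] := List.length_eq_zero_iff.mp hL
            have hm : refillCount comp3 temp1 = min 2 temp1.length := by
              rw [refillCount]; simp [hc3]
            rw [hm]
            cases temp1 with
            | nil =>
              rw [if_neg (by simp [hc3'', hnil])]
              simp [hc3'', hrest2', hnil]
            | cons x t2 =>
              cases t2 with
              | nil =>
                rw [if_neg (by simp [hc3'', hnil])]
                simp only [List.foldl]
                rw [stepB_short _ _ (by simp [hnil])]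
                simp [hc3'', hrest2', hnil]
              | cons y t3 =>
                have hmin : min 2 (x :: y :: t3).length = 2 := by simp
                rw [hmin]
                rw [if_pos (by simp [hc3'', hnil])]
                rw [hnil]
                simp only [List.foldl, stepB_nil, stepB_one]
                have := ih ((x :: y :: t3).drop 2) rest2 (comp3 ++ (x :: y :: t3).take 2)
                  (cnt + 1) (by simp only [List.length_cons, List.length_drop] at hn ⊢; omega)
                  (Or.inl (by simp [hc3'', hnil]))
                rw [show rest2 ++ (comp3 ++ (x :: y :: t3).take 2) = rc.1 ++ [x, y] by
                  simp [hc3'', hrest2', hnil]] at this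
                simpa [hnil] using this
          · -- one char left on the stack: refill 1 from temp1 if any
            have hm : refillCount comp3 temp1 = min 1 temp1.length := by
              rw [refillCount]; simp [hc3]
            rw [hm]
            cases temp1 with
            | nil =>
              rw [if_neg (by simp [hc3'', hL])]
              simp [hc3'', hrest2']
            | cons x t2 =>
              have hmin : min 1 (x :: t2).length = 1 := by simp
              rw [hmin]
              rw [if_pos (by simp [hc3'', hL])]
              simp only [List.foldl]
              rw [stepB_short (rc.1, cnt + 1) x (by simp [hL])]
              have := ih ((x :: t2).drop 1) rest2 (comp3 ++ (x :: t2).take 1)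
                (cnt + 1) (by simp only [List.length_cons, List.length_drop] at hn ⊢; omega)
                (Or.inl (by simp [hc3'', hL]))
              rw [show rest2 ++ (comp3 ++ (x :: t2).take 1) = rc.1 ++ [x] by
                simp [hc3'', hrest2']] at this
              simpa using this
      · -- no removal: recurse with the 3-char window
        have hstep : stepB (rest ++ comp, cnt) c = (rest ++ comp ++ [c], cnt) := by
          unfold stepB; simp only []
          rw [htop, if_neg h110]
        rw [if_neg h110, hfold, hstep]
        have := ih temp1 rc.1 (rc.2 ++ [c]) cnt (by simp only [List.length_cons] at hn; omega)
          (Or.inr (by simp [hc1]))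
        rw [show rc.1 ++ (rc.2 ++ [c]) = rest ++ comp ++ [c] from hassoc.symm] at this
        exact this

-- B's backward while-loop computes (last-zero index) + 1, or 0 when there is no zero
lemma findJ_eq_scanA (st : List Char) : ∀ n,
    findJ st n = (match scanA st n with | some i => i + 1 | none => 0) := by
  intro n
  induction n with
  | zero => simp [findJ, scanA]
  | succ n ih =>
    rw [findJ, scanA]
    by_cases h : st[n]? = some '0'
    · rw [if_pos h]; simp [h]
    · rw [if_neg h, ih]; simp [h]

-- A's three-branch reinsertion equals B's single splice
lemma insertA_eq_insertB (tg : List Char) (cnt : Nat) : insertA tg cnt = insertB tg cnt := by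
  unfold insertA insertB
  rw [findJ_eq_scanA]
  by_cases hnil : tg = []
  · subst hnil; simp [scanA]
  · rw [if_pos hnil]
    match hscan : scanA tg tg.length with
    | some i => simp
    | none => simp

lemma solveA_eq_solveB (t : String) : solveA t = solveB t := by
  unfold solveA solveB
  by_cases hlen : t.toList.length ≤ 3
  · rw [if_pos hlen, if_pos hlen]
  · obtain ⟨a, b, rest0, hT⟩ : ∃ a b r, t.toList = a :: b :: r := by
      match hT : t.toList with
      | [] => rw [hT] at hlen; simp at hlen
      | [x] => rw [hT] at hlen; simp at hlen
      | x :: y :: r => exact ⟨x, y, r, rfl⟩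
    rw [if_neg hlen, if_neg hlen, hT]
    simp only []
    -- B's fold: the first two pushes never pop
    have hfold : (a :: b :: rest0).foldl stepB ([], 0)
        = List.foldl stepB ([a, b], 0) rest0 := by
      simp only [List.foldl, stepB_nil, stepB_one]
    have hsim := loopA_sim rest0.length rest0 [] [a, b] 0 le_rfl (Or.inl rfl)
    have hsim' : ((loopA [] [a, b] rest0 0).1 ++ (loopA [] [a, b] rest0 0).2.1 ++
          (loopA [] [a, b] rest0 0).2.2.1,
        (loopA [] [a, b] rest0 0).2.2.2) = (a :: b :: rest0).foldl stepB ([], 0) := by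
      rw [hfold]
      simpa using hsim
    have hstk := congrArg Prod.fst hsim'
    have hcnt := congrArg Prod.snd hsim'
    simp only [] at hstk hcnt
    rw [hcnt]
    by_cases hc0 : ((a :: b :: rest0).foldl stepB ([], 0)).2 = 0
    · rw [if_pos hc0, if_pos hc0]
    · rw [if_neg hc0, if_neg hc0, hstk, insertA_eq_insertB]

-- fold-with-append is map, for both ports
lemma solution_is_map (s : List String) : solution s = s.map solveA := by
  simpa [solution] using PySem.List.foldl_append_singleton_eq_map solveA s []

lemma solution_alt_is_map (s : List String) : solution_alt s = s.map solveB := by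
  simpa [solution_alt] using PySem.List.foldl_append_singleton_eq_map solveB s []

-- ===== VERDICT (by name: the statement is the Claim_ definition above) =====
theorem solution_spec : Claim_equal_solution := by
  intro s _
  unfold Spec_solution
  rw [solution_is_map, solution_alt_is_map]
  exact List.map_congr_left fun t _ => solveA_eq_solveB t
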